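-- pv_equiv track=rewrite | github.com/alexpekarovsky/agent-leader | orchestrator_mcp_server.py | _aggregate_team_lanes
-- ===== SOURCE A (Python) =====
-- from typing import Any, Dict, List, Optional
--
-- def _aggregate_team_lanes(tasks: List[Dict[str, Any]]) -> Dict[str, Dict[str, int]]:
--     """Aggregate task counts by team_id and status for per-team lane visibility."""
--     team_lanes: Dict[str, Dict[str, int]] = {}
--     for task in tasks:
--         team_id = task.get("team_id")
--         if not team_id:
--             continue
--         if team_id not in team_lanes:
--             team_lanes[team_id] = {"total": 0}
--         team_lanes[team_id]["total"] += 1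
--         status = task.get("status", "unknown")
--         team_lanes[team_id][status] = team_lanes[team_id].get(status, 0) + 1
--     return team_lanes
-- ===== SOURCE B (Python) =====
-- def _aggregate_team_lanes(tasks):
--     """Group-first decomposition: collect each team's statuses, then build each lane."""
--     groups = {}
--     for task in tasks:
--         team_id = task.get("team_id")
--         if not team_id:
--             continue
--         groups[team_id] = groups.get(team_id, []) + [task.get("status", "unknown")]
--     result = {}
--     for team_id, statuses in groups.items():
--         lane = {"total": len(statuses)}
--         for status in statuses:
--             lane[status] = lane.get(status, 0) + 1
--         result[team_id] = lane
--     return result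
-- ===== Notes on version B (the rewrite author's own statement) =====
-- stated objective: alternative
-- what changed: A does one fused pass updating per-team count dicts; B first groups statuses per team into lists, then builds each lane from its group's length and a separate counting loop.
import Mathlib
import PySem

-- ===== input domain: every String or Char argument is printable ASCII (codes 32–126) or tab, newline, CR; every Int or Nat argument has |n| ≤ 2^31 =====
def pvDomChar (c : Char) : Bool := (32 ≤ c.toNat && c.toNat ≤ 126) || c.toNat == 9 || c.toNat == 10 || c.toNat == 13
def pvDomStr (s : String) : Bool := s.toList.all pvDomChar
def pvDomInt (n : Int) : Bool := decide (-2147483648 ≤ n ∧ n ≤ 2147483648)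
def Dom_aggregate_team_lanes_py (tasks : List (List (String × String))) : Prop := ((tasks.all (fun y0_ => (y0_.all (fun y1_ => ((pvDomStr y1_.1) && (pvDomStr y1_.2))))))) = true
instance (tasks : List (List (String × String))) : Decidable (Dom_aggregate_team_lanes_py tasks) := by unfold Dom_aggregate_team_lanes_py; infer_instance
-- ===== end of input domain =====

-- B replaces A's single fused counting pass by a group-statuses-first, then build-each-lane decomposition (alternative, same cost).

-- ===== PORT A =====
-- one loop iteration of A: look up team_id (falsy skip), ensure the lane exists, bump "total", bump the status count
def pvStepA (tl : PySem.Dict String (PySem.Dict String Int)) (task : List (String × String)) :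
    PySem.Dict String (PySem.Dict String Int) :=
  match (PySem.Dict.mk task).get? "team_id" with
  | none => tl
  | some tid =>
    if tid = "" then tl
    else
      let tl1 := if tl.contains tid then tl else tl.insert tid (PySem.Dict.empty.insert "total" 0)
      let lane := tl1.getD tid PySem.Dict.empty
      let lane1 := lane.insert "total" (lane.getD "total" 0 + 1)
      let status := (PySem.Dict.mk task).getD "status" "unknown"
      let lane2 := lane1.insert status (lane1.getD status 0 + 1)
      tl1.insert tid lane2

def aggregate_team_lanes_py (tasks : List (List (String × String))) : List (String × List (String × Int)) :=
  ((tasks.foldl pvStepA PySem.Dict.empty).items).map (fun p => (p.1, p.2.items))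

-- ===== PORT B =====
-- first pass: groups[tid] = groups.get(tid, []) + [task.get("status", "unknown")]
def pvStepG (g : PySem.Dict String (List String)) (task : List (String × String)) :
    PySem.Dict String (List String) :=
  match (PySem.Dict.mk task).get? "team_id" with
  | none => g
  | some tid =>
    if tid = "" then g
    else g.insert tid (g.getD tid [] ++ [(PySem.Dict.mk task).getD "status" "unknown"])

-- second pass, one group: lane = {"total": len(statuses)}; for status: lane[status] = lane.get(status,0)+1
def pvMkLane (sts : List String) : PySem.Dict String Int :=
  sts.foldl (fun lane st => lane.insert st (lane.getD st 0 + 1))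
    (PySem.Dict.empty.insert "total" (sts.length : Int))

def aggregate_team_lanes_py_alt (tasks : List (List (String × String))) : List (String × List (String × Int)) :=
  (((tasks.foldl pvStepG PySem.Dict.empty).items.foldl
      (fun r p => r.insert p.1 (pvMkLane p.2)) PySem.Dict.empty).items).map
    (fun p => (p.1, p.2.items))

-- ===== PRECONDITION & SPEC =====
def Spec_aggregate_team_lanes_py (tasks : List (List (String × String))) (out : List (String × List (String × Int))) : Prop := out = aggregate_team_lanes_py_alt tasks
instance (tasks : List (List (String × String))) (out : List (String × List (String × Int))) : Decidable (Spec_aggregate_team_lanes_py tasks out) := by unfold Spec_aggregate_team_lanes_py; infer_instance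

-- ===== CLAIM (what is proved, stated in full; the proofs are below) =====
def Claim_equal_aggregate_team_lanes_py : Prop := ∀ (tasks : List (List (String × String))), Dom_aggregate_team_lanes_py tasks → Spec_aggregate_team_lanes_py tasks (aggregate_team_lanes_py tasks)

-- ===== LEMMAS AND PROOFS =====

-- map pvMkLane over the values of a groups dict
def pvMapV (d : PySem.Dict String (List String)) : PySem.Dict String (PySem.Dict String Int) :=
  PySem.Dict.mk (d.items.map (fun p => (p.1, pvMkLane p.2)))

theorem pvMapV_get? (d : PySem.Dict String (List String)) (k : String) :
    (pvMapV d).get? k = (d.get? k).map pvMkLane := by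
  obtain ⟨l⟩ := d
  induction l with
  | nil => rfl
  | cons p rest ih =>
    simp only [pvMapV, List.map_cons] at *
    rw [PySem.Dict.get?_mk_cons, PySem.Dict.get?_mk_cons]
    by_cases h : p.1 == k
    · simp [h]
    · simp only [h, Bool.false_eq_true, if_false]
      exact ih

theorem pvMapV_contains (d : PySem.Dict String (List String)) (k : String) :
    (pvMapV d).contains k = d.contains k := by
  rw [PySem.Dict.contains_eq_isSome_get?, PySem.Dict.contains_eq_isSome_get?, pvMapV_get?]
  cases d.get? k <;> rfl

theorem pvMapV_insert (d : PySem.Dict String (List String)) (k : String) (v : List String) :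
    pvMapV (d.insert k v) = (pvMapV d).insert k (pvMkLane v) := by
  apply PySem.Dict.ext
  show (d.insert k v).items.map _ = _
  rw [PySem.Dict.items_insert, PySem.Dict.items_insert, pvMapV_contains]
  by_cases h : d.contains k
  · simp only [h, if_true]
    show _ = (d.items.map _).map _
    rw [List.map_map, List.map_map]
    apply List.map_congr_left
    intro p _
    by_cases hp : p.1 == k <;> simp [Function.comp, hp]
  · simp only [h, Bool.false_eq_true, if_false, List.map_append]
    rfl

-- lane characterisation
theorem pvKeys_mkLane (sts : List String) :
    (pvMkLane sts).keys = PySem.Set.update ["total"] sts := by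
  unfold pvMkLane
  rw [PySem.Dict.keys_foldl_insert, PySem.Dict.keys_insert_of_not_contains _ _ (PySem.Dict.contains_empty _)]
  rfl

theorem pvNodup_keys_mkLane (sts : List String) : (pvMkLane sts).keys.Nodup := by
  unfold pvMkLane
  apply PySem.Dict.nodup_keys_foldl_insert
  apply PySem.Dict.nodup_keys_insert
  exact PySem.Dict.nodup_keys_empty

theorem pvGetD_mkLane (sts : List String) (v : String) :
    (pvMkLane sts).getD v 0 = (if v = "total" then (sts.length : Int) else 0) + sts.count v := by
  unfold pvMkLane
  rw [PySem.Dict.getD_foldl_insert_add_one, PySem.Dict.getD_insert]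
  by_cases h : v = "total" <;> simp [h, PySem.Dict.getD_empty]

theorem pvTotal_mem_keys (sts : List String) : "total" ∈ (pvMkLane sts).keys := by
  rw [pvKeys_mkLane, PySem.Set.mem_update]
  left; simp

-- extensionality for dicts with Nodup keys: same keys, same getD ⇒ equal
theorem pvDict_eq_of_keys_getD {ν : Type} [Inhabited ν] (d d' : PySem.Dict String ν)
    (hd : d.keys.Nodup) (hd' : d'.keys.Nodup) (dflt : ν)
    (hk : d.keys = d'.keys) (hg : ∀ k, d.getD k dflt = d'.getD k dflt) : d = d' := by
  apply PySem.Dict.ext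
  rw [PySem.Dict.items_eq_map_keys d hd dflt, PySem.Dict.items_eq_map_keys d' hd' dflt, hk]
  apply List.map_congr_left
  intro k _
  rw [hg k]

-- the core lane step: A's in-place bump of "total" and of status equals B's lane for one more status
theorem pvLane_step (sts : List String) (st : String) :
    ((pvMkLane sts).insert "total" ((pvMkLane sts).getD "total" 0 + 1)).insert st
      (((pvMkLane sts).insert "total" ((pvMkLane sts).getD "total" 0 + 1)).getD st 0 + 1)
    = pvMkLane (sts ++ [st]) := by
  have hct : (pvMkLane sts).contains "total" = true := by
    rw [PySem.Dict.contains_iff_mem_keys]; exact pvTotal_mem_keys sts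
  have hkeys1 : ((pvMkLane sts).insert "total" ((pvMkLane sts).getD "total" 0 + 1)).keys
      = (pvMkLane sts).keys := PySem.Dict.keys_insert_of_contains _ _ hct
  have hnd1 : ((pvMkLane sts).insert "total" ((pvMkLane sts).getD "total" 0 + 1)).keys.Nodup := by
    rw [hkeys1]; exact pvNodup_keys_mkLane sts
  apply pvDict_eq_of_keys_getD _ _ (PySem.Dict.nodup_keys_insert _ _ _ hnd1)
    (pvNodup_keys_mkLane _) 0
  · -- keys
    rw [pvKeys_mkLane, PySem.Set.update_append, PySem.Set.update_cons, PySem.Set.update_nil]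
    by_cases hst : st ∈ PySem.Set.update ["total"] sts
    · have hc2 : ((pvMkLane sts).insert "total" ((pvMkLane sts).getD "total" 0 + 1)).contains st = true := by
        rw [PySem.Dict.contains_iff_mem_keys, hkeys1, pvKeys_mkLane]; exact hst
      rw [PySem.Dict.keys_insert_of_contains _ _ hc2, hkeys1, pvKeys_mkLane,
        PySem.Set.add_of_mem hst]
    · have hc2 : ((pvMkLane sts).insert "total" ((pvMkLane sts).getD "total" 0 + 1)).contains st = false := by
        rw [← Bool.not_eq_true, PySem.Dict.contains_iff_mem_keys, hkeys1, pvKeys_mkLane]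
        exact hst
      rw [PySem.Dict.keys_insert_of_not_contains _ _ hc2, hkeys1, pvKeys_mkLane,
        PySem.Set.add_of_not_mem hst]
  · -- getD
    intro k
    simp only [PySem.Dict.getD_insert, pvGetD_mkLane, List.count_append, List.count_cons,
      List.count_nil, List.length_append, List.length_cons, List.length_nil]
    by_cases h1 : k = st <;> by_cases h2 : k = "total" <;> by_cases h3 : st = "total" <;>
      simp_all <;> (try omega) <;> (intro h; simp_all)

-- one task step commutes with pvMapV
theorem pvStep_comm (d : PySem.Dict String (List String)) (task : List (String × String)) :
    pvStepA (pvMapV d) task = pvMapV (pvStepG d task) := by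
  unfold pvStepA pvStepG
  cases htid : (PySem.Dict.mk task).get? "team_id" with
  | none => rfl
  | some tid =>
    by_cases he : tid = ""
    · simp [he]
    · simp only [he, if_false]
      rw [pvMapV_contains]
      by_cases hc : d.contains tid = true
      · -- team already present
        simp only [hc, if_true]
        obtain ⟨sts, hsts⟩ : ∃ sts, d.get? tid = some sts := by
          rw [PySem.Dict.contains_eq_isSome_get?] at hc
          cases h : d.get? tid
          · rw [h] at hc; simp at hc
          · exact ⟨_, rfl⟩
        have hlane : (pvMapV d).getD tid PySem.Dict.empty = pvMkLane sts := by
          rw [PySem.Dict.getD_eq_get?_getD, pvMapV_get?, hsts]; rfl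
        have hgd : d.getD tid [] = sts := by
          rw [PySem.Dict.getD_eq_get?_getD, hsts]; rfl
        rw [hlane, hgd, pvMapV_insert, pvLane_step]
      · -- new team
        simp only [hc, Bool.false_eq_true, if_false]
        have hgd : d.getD tid [] = [] := by
          rw [PySem.Dict.getD_eq_get?_getD]
          rw [PySem.Dict.contains_eq_isSome_get?] at hc
          cases h : d.get? tid
          · rfl
          · rw [h] at hc; simp at hc
        rw [hgd, pvMapV_insert]
        rw [PySem.Dict.getD_insert_self, PySem.Dict.insert_insert_self]
        have hlane0 : (PySem.Dict.empty.insert "total" (0 : Int)).insert "total"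
            ((PySem.Dict.empty.insert "total" (0 : Int)).getD "total" 0 + 1)
            = PySem.Dict.empty.insert "total" (1 : Int) := by
          rw [PySem.Dict.getD_insert_self, PySem.Dict.insert_insert_self]; norm_num
        rw [hlane0]
        rfl

theorem pvFold_comm (tasks : List (List (String × String))) :
    ∀ d, tasks.foldl pvStepA (pvMapV d) = pvMapV (tasks.foldl pvStepG d) := by
  induction tasks with
  | nil => intro d; rfl
  | cons t rest ih =>
    intro d
    rw [List.foldl_cons, List.foldl_cons, pvStep_comm]
    exact ih _

theorem pvNodup_keys_stepG (d : PySem.Dict String (List String)) (task : List (String × String))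
    (h : d.keys.Nodup) : (pvStepG d task).keys.Nodup := by
  unfold pvStepG
  cases (PySem.Dict.mk task).get? "team_id" with
  | none => exact h
  | some tid =>
    by_cases he : tid = ""
    · simpa [he]
    · simp only [he, if_false]
      exact PySem.Dict.nodup_keys_insert _ _ _ h

theorem pvNodup_keys_groups (tasks : List (List (String × String))) :
    ∀ d : PySem.Dict String (List String), d.keys.Nodup →
      (tasks.foldl pvStepG d).keys.Nodup := by
  induction tasks with
  | nil => intro d h; exact h
  | cons t rest ih =>
    intro d h
    rw [List.foldl_cons]
    exact ih _ (pvNodup_keys_stepG d t h)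

-- ===== VERDICT (by name: the statement is the Claim_ definition above) =====
theorem aggregate_team_lanes_py_spec : Claim_equal_aggregate_team_lanes_py := by
  intro tasks _
  show aggregate_team_lanes_py tasks = aggregate_team_lanes_py_alt tasks
  unfold aggregate_team_lanes_py aggregate_team_lanes_py_alt
  have hA : tasks.foldl pvStepA PySem.Dict.empty
      = pvMapV (tasks.foldl pvStepG PySem.Dict.empty) := by
    have : (PySem.Dict.empty : PySem.Dict String (PySem.Dict String Int))
        = pvMapV PySem.Dict.empty := rfl
    rw [this, pvFold_comm]
  have hnd : (tasks.foldl pvStepG PySem.Dict.empty).keys.Nodup :=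
    pvNodup_keys_groups tasks _ PySem.Dict.nodup_keys_empty
  have hfresh : ((tasks.foldl pvStepG PySem.Dict.empty).items.foldl
      (fun r p => r.insert p.1 (pvMkLane p.2)) PySem.Dict.empty).items
      = (PySem.Dict.empty : PySem.Dict String (PySem.Dict String Int)).items
        ++ (tasks.foldl pvStepG PySem.Dict.empty).items.map (fun p => (p.1, pvMkLane p.2)) := by
    apply PySem.Dict.items_foldl_insert_fresh
    · intro a _; exact PySem.Dict.contains_empty _
    · exact hnd
  rw [hA, hfresh]
  rfl
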